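-- pv_equiv track=rewrite | github.com/A-stick-bug/Leetcode | 3791. Number of Balanced Integers in a Range.py | countBalanced
-- ===== SOURCE A (Python) =====
-- def countBalanced(low: int, high: int) -> int:
--     def solve_lower(n):
--         s = list(map(int, str(n)))
--         le = len(s)
--
--         mx_s = 2 * ((le + 1) // 2 * 9 + 2)
--         dp = [[[-1] * mx_s for _ in range(le + 1)] for _ in range(2)]
--
--         # dp[upper][idx][sum difference] ~2000 states
--
--         def solve(upper, idx, total):
--             if idx == le:
--                 return total == 0
--             if dp[upper][idx][total] != -1:
--                 return dp[upper][idx][total]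
--             mx_digit = s[idx] if upper else 9
--             res = 0
--             for digit in range(mx_digit + 1):
--                 delta = -digit if idx % 2 == 0 else digit
--                 res += solve(upper and (digit == s[idx]),
--                              idx + 1,
--                              total + delta)
--             dp[upper][idx][total] = res
--             return res
--
--         return solve(True, 0, 0)
--
--     return solve_lower(high) - solve_lower(low - 1)
-- ===== SOURCE B (Python) =====
-- def countBalanced(low: int, high: int) -> int:
--     def solve_lower(n):
--         # count of x in [0, n] whose alternating digit sum (+ at odd index, - at even index,
--         # computed on the zero-padded len(str(n))-digit string) is zero
--         if n < 0:
--             return 0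
--         s = [int(c) for c in str(n)]
--         le = len(s)
--         off = 9 * le
--         width = 18 * le + 1
--         # bottom-up suffix tables: tables[k][t + off] = number of ways to fill the last k
--         # positions (indices le-k .. le-1) with free digits 0-9 so the signed sum is t
--         table = [0] * width
--         table[off] = 1
--         tables = [table]
--         for k in range(1, le + 1):
--             i = le - k
--             sign = -1 if i % 2 == 0 else 1
--             prev = tables[-1]
--             cur = [sum(prev[j - sign * d] for d in range(10)
--                        if 0 <= j - sign * d < width)
--                    for j in range(width)]
--             tables.append(cur)
--         # single left-to-right walk along the tight prefix
--         ans = 0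
--         total = 0
--         for i in range(le):
--             sign = -1 if i % 2 == 0 else 1
--             suffix = tables[le - 1 - i]
--             for d in range(s[i]):
--                 t = -(total + sign * d)  # needed suffix sum
--                 if 0 <= t + off < width:
--                     ans += suffix[t + off]
--             total += sign * s[i]
--         return ans + (1 if total == 0 else 0)
--
--     return solve_lower(high) - solve_lower(low - 1)
-- ===== Notes on version B (the rewrite author's own statement) =====
-- stated objective: alternative
-- what changed: A's top-down memoized recursion over (tight, index, running sum) is replaced by an iterative bottom-up digit DP: suffix-count tables (plain lists indexed by sum+offset) are precomputed by forward convolution, then a single left-to-right walk along the tight digit prefix adds table lookups for each digit below the bound.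
import Mathlib
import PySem

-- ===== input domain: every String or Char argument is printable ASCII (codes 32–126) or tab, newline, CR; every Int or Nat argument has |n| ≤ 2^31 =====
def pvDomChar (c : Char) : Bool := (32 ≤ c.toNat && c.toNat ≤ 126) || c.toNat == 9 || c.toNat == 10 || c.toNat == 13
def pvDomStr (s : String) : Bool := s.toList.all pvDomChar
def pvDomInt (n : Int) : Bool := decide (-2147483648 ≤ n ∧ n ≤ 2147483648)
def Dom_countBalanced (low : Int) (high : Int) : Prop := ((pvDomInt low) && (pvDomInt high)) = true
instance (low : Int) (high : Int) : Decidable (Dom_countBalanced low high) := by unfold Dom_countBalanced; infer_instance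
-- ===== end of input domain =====

-- B replaces A's top-down memoized digit DP by an iterative bottom-up DP (precomputed
-- suffix-count tables + one tight-prefix walk); objective: alternative (similar cost).

-- ===== PORT A =====

-- `list(map(int, str(n)))` (A) / `[int(c) for c in str(n)]` (B) — the identical digitization
-- step of both sources; int(c) on a non-digit char raises (outside Pre_), modelled by getD 0.
def pyDigits (n : Int) : List Int :=
  (PySem.Int.toStr n).toList.map (fun c => (PySem.Int.ofChars? [c]).getD 0)

-- Python's list index dp[...][total]: a negative total indexes from the end of the length-mx_s row
def wrapIdx (mxs : Int) (t : Int) : Int := if t < 0 then mxs + t else t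

-- the memoized recursion `solve`; the dp table is modelled as a map (Python's -1 sentinel = none),
-- keyed by (upper, idx, wrapped row index) exactly as the Python list is indexed
def solveA (s : List Int) (le : Nat) (mxs : Int) :
    Nat → Bool → Nat → Int → (Bool → Nat → Int → Option Int) →
    Int × (Bool → Nat → Int → Option Int)
  | fuel, u, idx, total, dp =>
    if idx = le then ((if total = 0 then 1 else 0), dp)
    else
      match fuel with
      | 0 => (0, dp)  -- never reached: solveA is always called with fuel ≥ le - idx
      | fuel + 1 =>
        match dp u idx (wrapIdx mxs total) with
        | some v => (v, dp)
        | none =>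
          let sIdx := s.getD idx 0     -- s[idx]; 0 ≤ idx < len(s) on every call Python makes
          let mxd : Int := if u then sIdx else 9
          let p := (PySem.List.pyRange 0 (mxd + 1) 1).foldl
            (fun (st : Int × (Bool → Nat → Int → Option Int)) d =>
              let delta := if idx % 2 = 0 then -d else d
              let r := solveA s le mxs fuel (u && (d == sIdx)) (idx + 1) (total + delta) st.2
              (st.1 + r.1, r.2)) (0, dp)
          (p.1, fun u' i' t' =>
            if u' = u ∧ i' = idx ∧ t' = wrapIdx mxs total then some p.1 else p.2 u' i' t')

def solveLowerA (n : Int) : Int :=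
  let s := pyDigits n
  let le := s.length
  let mxs : Int := ((2 * ((le + 1) / 2 * 9 + 2) : Nat) : Int)
  (solveA s le mxs le true 0 0 (fun _ _ _ => none)).1

def countBalanced (low : Int) (high : Int) : Int :=
  solveLowerA high - solveLowerA (low - 1)

-- ===== PORT B =====

-- `table = [0]*width; table[off] = 1`
def baseB (le : Nat) : List Int := (List.replicate (18 * le + 1) (0 : Int)).set (9 * le) 1

-- the list comprehension building `cur` from the previous suffix table, for position i
def curB (le : Nat) (prev : List Int) (i : Nat) : List Int :=
  (List.range (18 * le + 1)).map (fun (j : Nat) =>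
    (PySem.List.pyRange 0 10 1).foldl (fun acc d =>
      let sign : Int := if i % 2 = 0 then -1 else 1
      let jj : Int := (j : Int) - sign * d
      if 0 ≤ jj ∧ jj < 18 * (le : Int) + 1 then acc + prev.getD jj.toNat 0 else acc) 0)

-- `for k in range(1, le+1): ... tables.append(cur)`
def tablesB (le : Nat) : List (List Int) :=
  (PySem.List.pyRange 1 ((le : Int) + 1) 1).foldl
    (fun tbs k => tbs ++ [curB le (tbs.getD (tbs.length - 1) []) (le - k.toNat)])
    [baseB le]

-- one iteration of the main walk: state (ans, total), loop variable i
def stepB (s : List Int) (le : Nat) (tables : List (List Int)) (st : Int × Int) (i : Int) :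
    Int × Int :=
  let sign : Int := if i % 2 = 0 then -1 else 1
  let suffix := PySem.List.pyGetD tables ((le : Int) - 1 - i) []
  let si := PySem.List.pyGetD s i 0
  let ans := (PySem.List.pyRange 0 si 1).foldl (fun a d =>
    let t := -(st.2 + sign * d)
    if 0 ≤ t + 9 * (le : Int) ∧ t + 9 * (le : Int) < 18 * (le : Int) + 1
    then a + suffix.getD (t + 9 * (le : Int)).toNat 0 else a) st.1
  (ans, st.2 + sign * si)

def solveLowerB (n : Int) : Int :=
  if n < 0 then 0
  else
    let s := pyDigits n
    let le := s.length
    let p := (PySem.List.pyRange 0 (le : Int) 1).foldl (stepB s le (tablesB le)) (0, 0)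
    p.1 + (if p.2 = 0 then 1 else 0)

def countBalanced_alt (low : Int) (high : Int) : Int :=
  solveLowerB high - solveLowerB (low - 1)

-- ===== PRECONDITION & SPEC =====
-- A raises ValueError iff low ≤ 0 or high < 0 (int() applied to the '-' of a negative str());
-- Pre_ is exactly the set of inputs on which A returns.
def Pre_countBalanced (low : Int) (high : Int) : Prop := 1 ≤ low ∧ 0 ≤ high
instance (low : Int) (high : Int) : Decidable (Pre_countBalanced low high) := by
  unfold Pre_countBalanced; infer_instance

def pvWitness_countBalanced : Int × Int := (1, 42)

def Spec_countBalanced (low : Int) (high : Int) (out : Int) : Prop := out = countBalanced_alt low high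
instance (low : Int) (high : Int) (out : Int) : Decidable (Spec_countBalanced low high out) := by
  unfold Spec_countBalanced; infer_instance

-- ===== CLAIM (what is proved, stated in full; the proofs are below) =====
def Claim_equal_countBalanced : Prop := ∀ (low : Int) (high : Int), Dom_countBalanced low high → Pre_countBalanced low high → Spec_countBalanced low high (countBalanced low high)

-- ===== LEMMAS AND PROOFS =====

-- the pure (memo-free) value of A's recursion, at a given fuel
def gS (s : List Int) (le : Nat) : Nat → Bool → Nat → Int → Int
  | fuel, u, idx, total =>
    if idx = le then (if total = 0 then 1 else 0)
    else match fuel with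
      | 0 => 0
      | fuel + 1 =>
        (PySem.List.pyRange 0 ((if u then s.getD idx 0 else 9) + 1) 1).foldl
          (fun r d => r + gS s le fuel (u && (d == s.getD idx 0)) (idx + 1)
              (total + (if idx % 2 = 0 then -d else d))) 0

-- states (idx, total) actually reachable in the recursion over digit strings
def ReachS (le idx : Nat) (t : Int) : Prop :=
  idx ≤ le ∧ -(9 * (((idx + 1) / 2 : Nat) : Int)) ≤ t ∧ t ≤ 9 * ((idx / 2 : Nat) : Int)

def mxsOf (le : Nat) : Int := ((2 * ((le + 1) / 2 * 9 + 2) : Nat) : Int)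

-- memo-table invariant: every stored entry is the pure value of its state
def InvA (s : List Int) (le : Nat) (dp : Bool → Nat → Int → Option Int) : Prop :=
  ∀ u i t v, ReachS le i t → dp u i (wrapIdx (mxsOf le) t) = some v →
    v = gS s le (le - i) u i t

lemma wrapIdx_inj (le i : Nat) {t1 t2 : Int} (h1 : ReachS le i t1) (h2 : ReachS le i t2)
    (he : wrapIdx (mxsOf le) t1 = wrapIdx (mxsOf le) t2) : t1 = t2 := by
  obtain ⟨hi1, ha1, hb1⟩ := h1
  obtain ⟨hi2, ha2, hb2⟩ := h2
  unfold wrapIdx mxsOf at he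
  split_ifs at he <;> omega

lemma solveA_go (s : List Int) (le : Nat) (hdig : ∀ x ∈ s, 0 ≤ x ∧ x ≤ 9) (hle : le = s.length) :
    ∀ fuel u idx total dp, le - idx ≤ fuel → ReachS le idx total → InvA s le dp →
      (solveA s le (mxsOf le) fuel u idx total dp).1 = gS s le (le - idx) u idx total ∧
      InvA s le (solveA s le (mxsOf le) fuel u idx total dp).2 := by
  intro fuel
  induction fuel with
  | zero =>
    intro u idx total dp hf hre hinv
    have hidx : idx = le := by have := hre.1; omega
    subst hidx
    constructor
    · simp [solveA, gS]
    · simpa [solveA] using hinv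
  | succ f ihf =>
    intro u idx total dp hf hre hinv
    by_cases hidx : idx = le
    · subst hidx
      constructor
      · simp [solveA, gS]
      · simpa [solveA] using hinv
    · have hlt : idx < le := lt_of_le_of_ne hre.1 hidx
      -- the inner for-loop, for any digit list whose members are digits
      have hFold : ∀ (L : List Int), (∀ d ∈ L, 0 ≤ d ∧ d ≤ 9) → ∀ (a : Int)
          (dp0 : Bool → Nat → Int → Option Int), InvA s le dp0 →
          (L.foldl (fun (st : Int × (Bool → Nat → Int → Option Int)) d =>
              let delta := if idx % 2 = 0 then -d else d
              let r := solveA s le (mxsOf le) f (u && (d == s.getD idx 0)) (idx + 1)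
                (total + delta) st.2
              (st.1 + r.1, r.2)) (a, dp0)).1
            = a + (L.map (fun d => gS s le (le - (idx + 1)) (u && (d == s.getD idx 0)) (idx + 1)
                (total + (if idx % 2 = 0 then -d else d)))).sum ∧
          InvA s le ((L.foldl (fun (st : Int × (Bool → Nat → Int → Option Int)) d =>
              let delta := if idx % 2 = 0 then -d else d
              let r := solveA s le (mxsOf le) f (u && (d == s.getD idx 0)) (idx + 1)
                (total + delta) st.2
              (st.1 + r.1, r.2)) (a, dp0)).2) := by
        intro L
        induction L with
        | nil => intro _ a dp0 h0; exact ⟨by simp, h0⟩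
        | cons x L ihL =>
          intro hb a dp0 h0
          have hx := hb x List.mem_cons_self
          have hre' : ReachS le (idx + 1) (total + (if idx % 2 = 0 then -x else x)) := by
            obtain ⟨h1, h2, h3⟩ := hre
            by_cases hp : idx % 2 = 0
            · rw [if_pos hp]; exact ⟨by omega, by omega, by omega⟩
            · rw [if_neg hp]
              have hp1 : idx % 2 = 1 := by omega
              exact ⟨by omega, by omega, by omega⟩
          have hrec := ihf (u && (x == s.getD idx 0)) (idx + 1)
            (total + (if idx % 2 = 0 then -x else x)) dp0 (by omega) hre' h0
          rw [List.foldl_cons]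
          have hrest := ihL (fun d hd => hb d (List.mem_cons_of_mem x hd))
            (a + (solveA s le (mxsOf le) f (u && (x == s.getD idx 0)) (idx + 1)
              (total + (if idx % 2 = 0 then -x else x)) dp0).1)
            ((solveA s le (mxsOf le) f (u && (x == s.getD idx 0)) (idx + 1)
              (total + (if idx % 2 = 0 then -x else x)) dp0).2) hrec.2
          refine ⟨?_, hrest.2⟩
          rw [hrest.1, hrec.1, List.map_cons, List.sum_cons]
          ring
      -- digit bound for the loop's range
      have hsi : 0 ≤ s.getD idx 0 ∧ s.getD idx 0 ≤ 9 := by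
        have hmem : s.getD idx 0 ∈ s := by
          rw [List.getD_eq_getElem s 0 (by omega)]
          exact List.getElem_mem _
        exact hdig _ hmem
      have hrange : ∀ d ∈ PySem.List.pyRange 0 ((if u then s.getD idx 0 else 9) + 1) 1,
          0 ≤ d ∧ d ≤ 9 := by
        intro d hd
        rw [PySem.List.mem_pyRange_one] at hd
        cases u
        · simp only [Bool.false_eq_true, if_false] at hd; omega
        · simp only [if_pos] at hd; omega
      simp only [solveA, if_neg hidx]
      cases hdp : dp u idx (wrapIdx (mxsOf le) total) with
      | some v =>
        simp only
        exact ⟨hinv u idx total v hre hdp, hinv⟩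
      | none =>
        simp only
        have hmain := hFold _ hrange 0 dp hinv
        have hres : ((PySem.List.pyRange 0 ((if u then s.getD idx 0 else 9) + 1) 1).foldl
            (fun (st : Int × (Bool → Nat → Int → Option Int)) d =>
              let delta := if idx % 2 = 0 then -d else d
              let r := solveA s le (mxsOf le) f (u && (d == s.getD idx 0)) (idx + 1)
                (total + delta) st.2
              (st.1 + r.1, r.2)) (0, dp)).1 = gS s le (le - idx) u idx total := by
          rw [hmain.1, show le - idx = (le - (idx + 1)) + 1 from by omega]
          simp only [gS, if_neg hidx]
          rw [PySem.List.foldl_add]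
        refine ⟨hres, ?_⟩
        intro u' i' t' v' hre' hlk
        simp only at hlk
        by_cases hkey : u' = u ∧ i' = idx ∧
            wrapIdx (mxsOf le) t' = wrapIdx (mxsOf le) total
        · obtain ⟨rfl, rfl, heq⟩ := hkey
          have ht' : t' = total := wrapIdx_inj le _ hre' hre heq
          subst ht'
          rw [if_pos ⟨rfl, rfl, heq⟩] at hlk
          have hv := Option.some_inj.mp hlk
          rw [← hv]
          exact hres
        · rw [if_neg hkey] at hlk
          exact hmain.2 u' i' t' v' hre' hlk

lemma gS_zero (s : List Int) (le : Nat) :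
    ∀ fuel idx total, idx ≤ le → le - idx ≤ fuel →
      (9 * ((le - idx : Nat) : Int) < total ∨ total < -(9 * ((le - idx : Nat) : Int))) →
      gS s le fuel false idx total = 0 := by
  intro fuel
  induction fuel with
  | zero =>
    intro idx total h1 h2 h3
    have hidx : idx = le := by omega
    subst hidx
    simp only [gS, reduceIte]
    have : total ≠ 0 := by simp at h3 ⊢; omega
    simp [this]
  | succ f ih =>
    intro idx total h1 h2 h3
    by_cases hidx : idx = le
    · subst hidx
      simp only [gS, reduceIte]
      have : total ≠ 0 := by simp at h3 ⊢; omega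
      simp [this]
    · simp only [gS, if_neg hidx, Bool.false_and]
      rw [PySem.List.foldl_add]
      simp only [zero_add]
      apply List.sum_eq_zero
      intro y hy
      simp only [List.mem_map] at hy
      obtain ⟨d, hd, rfl⟩ := hy
      rw [PySem.List.mem_pyRange_one] at hd
      simp only [Bool.false_eq_true, if_false] at hd
      have hile : idx + 1 ≤ le := by omega
      by_cases hp : idx % 2 = 0
      · rw [if_pos hp]; apply ih <;> omega
      · rw [if_neg hp]; apply ih <;> omega

-- guarded table lookup, the shape both B loops use
def lookupW (le : Nat) (l : List Int) (x : Int) : Int :=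
  if 0 ≤ x ∧ x < 18 * (le : Int) + 1 then l.getD x.toNat 0 else 0

-- the k-th suffix table
def TB (le : Nat) : Nat → List Int
  | 0 => baseB le
  | k + 1 => curB le (TB le k) (le - (k + 1))

lemma tablesB_go (le : Nat) : ∀ m, m ≤ le →
    (PySem.List.pyRange 1 ((m : Int) + 1) 1).foldl
      (fun tbs k => tbs ++ [curB le (tbs.getD (tbs.length - 1) []) (le - k.toNat)])
      [baseB le]
    = (List.range (m + 1)).map (TB le) := by
  intro m
  induction m with
  | zero =>
    intro _
    rw [PySem.List.pyRange_one_eq_nil (by norm_num)]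
    simp [TB]
  | succ m ih =>
    intro hm
    have hcast : (((m + 1 : Nat) : Int)) + 1 = (((m : Nat) : Int) + 1) + 1 := by push_cast; ring
    rw [hcast, PySem.List.pyRange_one_succ_right (by omega), List.foldl_append]
    rw [ih (by omega)]
    simp only [List.foldl_cons, List.foldl_nil]
    have hlen : ((List.range (m + 1)).map (TB le)).length = m + 1 := by simp
    rw [hlen]
    have hgd : ((List.range (m + 1)).map (TB le)).getD (m + 1 - 1) [] = TB le m :=
      PySem.List.getD_map_range (TB le) (m + 1) m [] (by omega)
    rw [hgd]
    have ht : (((m : Nat) : Int) + 1).toNat = m + 1 := by omega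
    rw [ht]
    simp [List.range_succ, TB]

lemma tablesB_eq (le : Nat) : tablesB le = (List.range (le + 1)).map (TB le) := by
  unfold tablesB
  exact tablesB_go le le le.le_refl

lemma TB_val (s : List Int) (le : Nat) :
    ∀ k, k ≤ le → ∀ t : Int,
      lookupW le (TB le k) (t + 9 * le) = gS s le k false (le - k) (-t) := by
  intro k
  induction k with
  | zero =>
    intro _ t
    have hR : gS s le 0 false (le - 0) (-t) = if t = 0 then (1 : Int) else 0 := by
      simp [gS, neg_eq_zero]
    rw [hR]
    unfold lookupW TB baseB
    by_cases hin : 0 ≤ t + 9 * (le : Int) ∧ t + 9 * (le : Int) < 18 * (le : Int) + 1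
    · rw [if_pos hin]
      have hj : (t + 9 * (le : Int)).toNat < (((List.replicate (18 * le + 1) (0 : Int)).set (9 * le) 1)).length := by
        simp; omega
      rw [List.getD_eq_getElem _ _ hj]
      rcases eq_or_ne t 0 with rfl | ht
      · rw [if_pos rfl]
        have h9 : ((0 : Int) + 9 * (le : Int)).toNat = 9 * le := by omega
        simp only [h9]
        rw [List.getElem_set_self]
      · rw [List.getElem_set_ne (by omega), List.getElem_replicate, if_neg ht]
    · rw [if_neg hin, if_neg (by omega)]
  | succ k ih =>
    intro hk t
    have hkle : k ≤ le := by omega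
    have hi : le - (k + 1) ≠ le := by omega
    have hidx1 : le - (k + 1) + 1 = le - k := by omega
    by_cases hin : 0 ≤ t + 9 * (le : Int) ∧ t + 9 * (le : Int) < 18 * (le : Int) + 1
    · unfold lookupW
      rw [if_pos hin]
      show (curB le (TB le k) (le - (k + 1))).getD _ 0 = _
      unfold curB
      have hj : (t + 9 * (le : Int)).toNat < 18 * le + 1 := by omega
      rw [PySem.List.getD_map_range _ _ _ _ hj]
      have hJ : (((t + 9 * (le : Int)).toNat : Nat) : Int) = t + 9 * (le : Int) := by omega
      -- turn each guarded add into a lookupW of the previous table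
      have hL : ∀ (L : List Int) (a : Int),
          L.foldl (fun acc d =>
            let sign : Int := if (le - (k + 1)) % 2 = 0 then -1 else 1
            let jj : Int := (((t + 9 * (le : Int)).toNat : Nat) : Int) - sign * d
            if 0 ≤ jj ∧ jj < 18 * (le : Int) + 1 then acc + (TB le k).getD jj.toNat 0 else acc) a
          = a + (L.map (fun d =>
              lookupW le (TB le k)
                ((t - (if (le - (k + 1)) % 2 = 0 then (-1 : Int) else 1) * d) + 9 * (le : Int)))).sum := by
        intro L
        induction L with
        | nil => intro a; simp
        | cons x L ihL =>
          intro a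
          rw [List.foldl_cons, ihL, List.map_cons, List.sum_cons]
          have harg : (((t + 9 * (le : Int)).toNat : Nat) : Int)
                - (if (le - (k + 1)) % 2 = 0 then (-1 : Int) else 1) * x
              = (t - (if (le - (k + 1)) % 2 = 0 then (-1 : Int) else 1) * x) + 9 * (le : Int) := by
            rw [hJ]; ring
          simp only [lookupW, harg]
          split_ifs with hg <;> ring
      rw [hL]
      -- unfold the gS step on the right
      have hgoal : gS s le (k + 1) false (le - (k + 1)) (-t)
          = ((PySem.List.pyRange 0 10 1).map (fun d =>
              gS s le k false (le - k)
                (-t + (if (le - (k + 1)) % 2 = 0 then -d else d)))).sum := by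
        simp only [gS, if_neg hi, Bool.false_and, Bool.false_eq_true, if_false]
        rw [PySem.List.foldl_add]
        simp only [zero_add, hidx1]
        norm_num
      rw [hgoal, zero_add]
      apply congrArg List.sum
      apply List.map_congr_left
      intro d hd
      rw [ih hkle (t - (if (le - (k + 1)) % 2 = 0 then (-1 : Int) else 1) * d)]
      by_cases hp : (le - (k + 1)) % 2 = 0
      · rw [if_pos hp, if_pos hp]
        congr 1
        ring
      · rw [if_neg hp, if_neg hp]
        congr 1
        ring
    · unfold lookupW
      rw [if_neg hin]
      symm
      apply gS_zero s le (k + 1) (le - (k + 1)) (-t) (by omega) (by omega)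
      omega

lemma mainLoop (s : List Int) (le : Nat) (hdig : ∀ x ∈ s, 0 ≤ x ∧ x ≤ 9) (hle : le = s.length) :
    ∀ m i₀, i₀ ≤ le → m = le - i₀ → ∀ ans total, ReachS le i₀ total →
      (((PySem.List.pyRange (i₀ : Int) (le : Int) 1).foldl (stepB s le (tablesB le)) (ans, total)).1
        + (if ((PySem.List.pyRange (i₀ : Int) (le : Int) 1).foldl (stepB s le (tablesB le)) (ans, total)).2 = 0 then 1 else 0))
      = ans + gS s le (le - i₀) true i₀ total := by
  intro m
  induction m with
  | zero =>
    intro i₀ hi₀ hm ans total _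
    have : i₀ = le := by omega
    subst this
    rw [PySem.List.pyRange_one_eq_nil (by omega)]
    simp [gS]
  | succ m ih =>
    intro i₀ hi₀ hm ans total hre
    have hlt : i₀ < le := by omega
    -- digit bounds at position i₀
    have hsi : 0 ≤ s.getD i₀ 0 ∧ s.getD i₀ 0 ≤ 9 := by
      have hmem : s.getD i₀ 0 ∈ s := by
        rw [List.getD_eq_getElem s 0 (by omega)]
        exact List.getElem_mem _
      exact hdig _ hmem
    set si := s.getD i₀ 0 with hsidef
    set sgn : Int := if ((i₀ : Int)) % 2 = 0 then -1 else 1 with hsgn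
    -- one step of the walk
    have hstep : stepB s le (tablesB le) (ans, total) (i₀ : Int)
        = (ans + ((PySem.List.pyRange 0 si 1).map (fun d =>
            lookupW le (TB le (le - 1 - i₀)) (-(total + sgn * d) + 9 * (le : Int)))).sum,
           total + sgn * si) := by
      unfold stepB
      simp only [PySem.List.pyGetD_natCast, ← hsidef, ← hsgn]
      have hidxcast : ((le : Int) - 1 - (i₀ : Int)) = ((le - 1 - i₀ : Nat) : Int) := by omega
      rw [tablesB_eq, hidxcast, PySem.List.pyGetD_natCast,
        PySem.List.getD_map_range _ _ _ _ (by omega)]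
      have hL : ∀ (L : List Int) (a : Int),
          L.foldl (fun a d =>
            let t := -(total + sgn * d)
            if 0 ≤ t + 9 * (le : Int) ∧ t + 9 * (le : Int) < 18 * (le : Int) + 1
            then a + (TB le (le - 1 - i₀)).getD (t + 9 * (le : Int)).toNat 0 else a) a
          = a + (L.map (fun d =>
              lookupW le (TB le (le - 1 - i₀)) (-(total + sgn * d) + 9 * (le : Int)))).sum := by
        intro L
        induction L with
        | nil => intro a; simp
        | cons x L ihL =>
          intro a
          rw [List.foldl_cons, ihL, List.map_cons, List.sum_cons]
          simp only [lookupW]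
          split_ifs with hg <;> ring
      rw [hL]
    rw [PySem.List.pyRange_one_cons (by exact_mod_cast hlt), List.foldl_cons, hstep]
    have hcast1 : ((i₀ : Int)) + 1 = ((i₀ + 1 : Nat) : Int) := by push_cast; ring
    rw [hcast1]
    have hreach' : ReachS le (i₀ + 1) (total + sgn * si) := by
      obtain ⟨h1, h2, h3⟩ := hre
      refine ⟨by omega, ?_, ?_⟩ <;>
      · rcases Nat.even_or_odd i₀ with hp | hp
        · have hp2 : i₀ % 2 = 0 := Nat.even_iff.mp hp
          have : sgn = -1 := by rw [hsgn, if_pos (by omega)]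
          rw [this]; omega
        · have hp2 : i₀ % 2 = 1 := Nat.odd_iff.mp hp
          have : sgn = 1 := by rw [hsgn, if_neg (by omega)]
          rw [this]; omega
    rw [ih (i₀ + 1) (by omega) (by omega) _ _ hreach']
    -- unfold one step of gS on the right
    have hfuel : le - i₀ = (le - (i₀ + 1)) + 1 := by omega
    rw [hfuel]
    simp only [gS, if_neg (show ¬ i₀ = le by omega), if_pos, Bool.true_and, ← hsidef]
    rw [PySem.List.pyRange_one_succ_right (by omega : (0 : Int) ≤ si), List.foldl_append,
      List.foldl_cons, List.foldl_nil]
    have hlast : (si == si) = true := by simp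
    rw [hlast]
    -- the strict digits of the tight step are not equal to s[i₀]
    have hne : ∀ (L : List Int), (∀ d ∈ L, (d == si) = false) → ∀ (r : Int),
        L.foldl (fun r d => r + gS s le (le - (i₀ + 1)) (d == si) (i₀ + 1)
          (total + (if i₀ % 2 = 0 then -d else d))) r
        = r + (L.map (fun d => gS s le (le - (i₀ + 1)) false (i₀ + 1)
            (total + (if i₀ % 2 = 0 then -d else d)))).sum := by
      intro L
      induction L with
      | nil => intro _ r; simp
      | cons x L ihL =>
        intro hcond r
        rw [List.foldl_cons, ihL (fun d hd => hcond d (List.mem_cons_of_mem x hd)),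
          List.map_cons, List.sum_cons, hcond x List.mem_cons_self]
        ring
    rw [hne _ (by
      intro d hd
      rw [PySem.List.mem_pyRange_one] at hd
      simp only [beq_eq_false_iff_ne, ne_eq]
      omega)]
    -- compare summands: table lookups = untight gS values
    have hmc : (PySem.List.pyRange 0 si 1).map (fun d =>
          lookupW le (TB le (le - 1 - i₀)) (-(total + sgn * d) + 9 * (le : Int)))
        = (PySem.List.pyRange 0 si 1).map (fun d => gS s le (le - (i₀ + 1)) false (i₀ + 1)
            (total + (if i₀ % 2 = 0 then -d else d))) := by
      apply List.map_congr_left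
      intro d hd
      have hTB := TB_val s le (le - 1 - i₀) (by omega) (-(total + sgn * d))
      have e1 : le - (le - 1 - i₀) = i₀ + 1 := by omega
      have e2 : le - 1 - i₀ = le - (i₀ + 1) := by omega
      rw [e1, e2] at hTB
      rw [e2, hTB]
      congr 1
      rcases Nat.even_or_odd i₀ with hp | hp
      · have hp2 : i₀ % 2 = 0 := Nat.even_iff.mp hp
        have h1 : sgn = -1 := by rw [hsgn, if_pos (by omega)]
        rw [h1, if_pos hp2]; ring
      · have hp2 : i₀ % 2 = 1 := Nat.odd_iff.mp hp
        have h1 : sgn = 1 := by rw [hsgn, if_neg (by omega)]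
        rw [h1, if_neg (by omega)]; ring
    rw [hmc]
    -- both sides now agree up to the last (tight) summand and regrouping
    have hdelta : total + (if i₀ % 2 = 0 then -si else si) = total + sgn * si := by
      rcases Nat.even_or_odd i₀ with hp | hp
      · have hp2 : i₀ % 2 = 0 := Nat.even_iff.mp hp
        have h1 : sgn = -1 := by rw [hsgn, if_pos (by omega)]
        rw [h1, if_pos hp2]; ring
      · have hp2 : i₀ % 2 = 1 := Nat.odd_iff.mp hp
        have h1 : sgn = 1 := by rw [hsgn, if_neg (by omega)]
        rw [h1, if_neg (by omega)]; ring
    rw [hdelta]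
    ring

lemma pyDigits_bounds (n : Int) (hn : 0 ≤ n) : ∀ x ∈ pyDigits n, 0 ≤ x ∧ x ≤ 9 := by
  intro x hx
  unfold pyDigits at hx
  rw [PySem.Int.toList_toStr] at hx
  simp only [List.mem_map] at hx
  obtain ⟨c, hc, rfl⟩ := hx
  have hcd : c.isDigit := by
    apply Nat.isDigit_of_mem_toDigits (b := 10) (by norm_num) (by norm_num) (n := n.toNat)
    simpa [PySem.Int.toChars, not_lt.mpr hn] using hc
  have h1 : 48 ≤ c.toNat ∧ c.toNat ≤ 57 := by
    simp [Char.isDigit] at hcd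
    exact ⟨hcd.1, hcd.2⟩
  obtain ⟨h1, h2⟩ := h1
  have hc' : c = Char.ofNat c.toNat := by simp [Char.ofNat_toNat]
  rw [hc']
  interval_cases h3 : c.toNat <;> decide

lemma solveLower_eq (n : Int) (hn : 0 ≤ n) : solveLowerA n = solveLowerB n := by
  have hdig := pyDigits_bounds n hn
  have h0 : ReachS (pyDigits n).length 0 0 := ⟨Nat.zero_le _, by simp, by simp⟩
  have hA : solveLowerA n = gS (pyDigits n) (pyDigits n).length (pyDigits n).length true 0 0 := by
    unfold solveLowerA
    have hinv : InvA (pyDigits n) (pyDigits n).length (fun _ _ _ => none) := by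
      intro u i t v _ h
      simp at h
    have h := solveA_go (pyDigits n) (pyDigits n).length hdig rfl
      (pyDigits n).length true 0 0 (fun _ _ _ => none) (by omega) h0 hinv
    simpa [mxsOf] using h.1
  have hB : solveLowerB n = gS (pyDigits n) (pyDigits n).length (pyDigits n).length true 0 0 := by
    unfold solveLowerB
    rw [if_neg (by omega)]
    have h := mainLoop (pyDigits n) (pyDigits n).length hdig rfl
      (pyDigits n).length 0 (Nat.zero_le _) (by omega) 0 0 h0
    simpa using h
  rw [hA, hB]

-- ===== VERDICT (by name: the statement is the Claim_ definition above) =====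
theorem countBalanced_spec : Claim_equal_countBalanced := by
  intro low high _ hpre
  obtain ⟨h1, h2⟩ := hpre
  unfold Spec_countBalanced countBalanced countBalanced_alt
  rw [solveLower_eq high h2, solveLower_eq (low - 1) (by omega)]
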